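-- pv_equiv track=rewrite | github.com/leivyfrostbispo1999-commits/sentinela | services/rule_engine/main.py | has_multistage_sequence
-- ===== SOURCE A (Python) =====
-- def has_multistage_sequence(events):
--     saw_scan = False
--     for item in events:
--         event_type = item["event_type"].replace("-", "_").replace(" ", "_")
--         if "PORT_SCAN" in event_type or event_type == "SCAN":
--             saw_scan = True
--         if saw_scan and ("BRUTE" in event_type or event_type in {"SSH_FAILED", "LOGIN_FAILED", "AUTH_FAILED"}):
--             return True
--     return False
-- ===== SOURCE B (Python) =====
-- def has_multistage_sequence(events):
--     types = [it["event_type"].replace("-", "_").replace(" ", "_") for it in events]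
--     scan_idx = [i for i, t in enumerate(types) if "PORT_SCAN" in t or t == "SCAN"]
--     brute_idx = [i for i, t in enumerate(types)
--                  if "BRUTE" in t or t in {"SSH_FAILED", "LOGIN_FAILED", "AUTH_FAILED"}]
--     return bool(scan_idx) and bool(brute_idx) and min(scan_idx) <= max(brute_idx)
-- ===== Notes on version B (the rewrite author's own statement) =====
-- stated objective: alternative
-- what changed: Replaces A's stateful short-circuiting sweep (saw_scan flag, early return) by an index-set formulation: normalize all event types, collect the index lists of scan and brute/auth-fail events, and answer min(scan_idx) <= max(brute_idx).
import Mathlib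
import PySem

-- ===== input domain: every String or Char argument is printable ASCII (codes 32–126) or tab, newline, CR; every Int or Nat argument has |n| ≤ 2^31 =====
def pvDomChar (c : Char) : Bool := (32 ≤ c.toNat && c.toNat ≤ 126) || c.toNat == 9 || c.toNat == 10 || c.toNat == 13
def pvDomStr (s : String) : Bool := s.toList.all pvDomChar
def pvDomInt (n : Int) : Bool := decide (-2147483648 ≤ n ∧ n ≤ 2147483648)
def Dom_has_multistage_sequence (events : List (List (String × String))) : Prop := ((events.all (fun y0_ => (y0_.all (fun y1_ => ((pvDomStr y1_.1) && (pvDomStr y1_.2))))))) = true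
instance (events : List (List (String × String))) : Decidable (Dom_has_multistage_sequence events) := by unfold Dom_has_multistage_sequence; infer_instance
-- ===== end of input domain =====

-- B replaces A's stateful short-circuiting sweep by an index-set formulation
-- (first scan index vs last brute index); alternative decomposition, same O(n) cost.

-- shared helper: item["event_type"].replace("-","_").replace(" ","_")  (Pre_ guarantees the key is present)
def hmsEventType (item : List (String × String)) : String :=
  PySem.Str.replace (PySem.Str.replace (((PySem.Dict.mk item).get? "event_type").getD "") "-" "_") " " "_"

-- ===== PORT A =====
-- A's for-loop with the saw_scan flag and early return, as structural recursion over the same state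
def hmsLoopA (saw_scan : Bool) : List (List (String × String)) → Bool
  | [] => false
  | item :: rest =>
    let event_type := hmsEventType item
    let saw_scan' := if PySem.Str.isIn "PORT_SCAN" event_type || event_type == "SCAN" then true else saw_scan
    if saw_scan' && (PySem.Str.isIn "BRUTE" event_type ||
        (event_type == "SSH_FAILED" || event_type == "LOGIN_FAILED" || event_type == "AUTH_FAILED")) then
      true
    else
      hmsLoopA saw_scan' rest

def has_multistage_sequence (events : List (List (String × String))) : Bool :=
  hmsLoopA false events

-- ===== PORT B =====
def hmsScanT (t : String) : Bool := PySem.Str.isIn "PORT_SCAN" t || t == "SCAN"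

def hmsBruteT (t : String) : Bool :=
  PySem.Str.isIn "BRUTE" t || (t == "SSH_FAILED" || t == "LOGIN_FAILED" || t == "AUTH_FAILED")

def has_multistage_sequence_alt (events : List (List (String × String))) : Bool :=
  let types := events.map hmsEventType
  let scan_idx := ((PySem.List.enumerate types 0).filter (fun pr => hmsScanT pr.2)).map Prod.fst
  let brute_idx := ((PySem.List.enumerate types 0).filter (fun pr => hmsBruteT pr.2)).map Prod.fst
  match PySem.List.min? scan_idx (fun x => x), PySem.List.max? brute_idx (fun x => x) with
  | some mn, some mx => decide (mn ≤ mx)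
  | _, _ => false

-- ===== PRECONDITION & SPEC =====
-- Pre_ excludes events containing an item without the "event_type" key: there A raises KeyError
-- (or returns before reaching it, while B, which normalizes all items first, raises).
def Pre_has_multistage_sequence (events : List (List (String × String))) : Prop :=
  ∀ item ∈ events, ((PySem.Dict.mk item).get? "event_type").isSome = true
instance (events : List (List (String × String))) : Decidable (Pre_has_multistage_sequence events) := by unfold Pre_has_multistage_sequence; infer_instance
def pvWitness_has_multistage_sequence : (List (List (String × String))) :=
  [[("event_type", "PORT_SCAN")], [("event_type", "SSH_FAILED")]]

def Spec_has_multistage_sequence (events : List (List (String × String))) (out : Bool) : Prop := out = has_multistage_sequence_alt events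
instance (events : List (List (String × String))) (out : Bool) : Decidable (Spec_has_multistage_sequence events out) := by unfold Spec_has_multistage_sequence; infer_instance

-- ===== CLAIM (what is proved, stated in full; the proofs are below) =====
def Claim_equal_has_multistage_sequence : Prop := ∀ (events : List (List (String × String))), Dom_has_multistage_sequence events → Pre_has_multistage_sequence events → Spec_has_multistage_sequence events (has_multistage_sequence events)

-- ===== LEMMAS AND PROOFS =====
-- item-level predicates (proof-only names for the tests A's loop performs inline)
def hmsScanI (item : List (String × String)) : Bool := hmsScanT (hmsEventType item)
def hmsBruteI (item : List (String × String)) : Bool := hmsBruteT (hmsEventType item)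

-- one step of A's loop, written with the named predicates (definitionally A's inline tests)
theorem hmsLoopA_cons (b : Bool) (item : List (String × String)) (rest : List (List (String × String))) :
    hmsLoopA b (item :: rest) =
      (if (if hmsScanI item then true else b) && hmsBruteI item then true
       else hmsLoopA (if hmsScanI item then true else b) rest) := rfl

-- once saw_scan is true, A's loop is just 'any brute'
theorem hmsLoopA_true (events : List (List (String × String))) :
    hmsLoopA true events = events.any hmsBruteI := by
  induction events with
  | nil => rfl
  | cons item rest ih =>
    rw [hmsLoopA_cons]
    cases hsc : hmsScanI item <;> cases hb : hmsBruteI item <;>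
      simp [List.any_cons, hb, ih]

theorem hmsLoopA_false (events : List (List (String × String))) :
    hmsLoopA false events = (events.dropWhile (fun it => !(hmsScanI it))).any hmsBruteI := by
  induction events with
  | nil => rfl
  | cons item rest ih =>
    rw [hmsLoopA_cons]
    cases hsc : hmsScanI item <;> cases hb : hmsBruteI item <;>
      simp [List.any_cons, hsc, hb, ih, hmsLoopA_true]

-- the Prop both programs decide: a scan at index i, a brute at index j ≥ i
def hmsSeq {α : Type} (p q : α → Bool) (ts : List α) : Prop :=
  ∃ i j : Nat, i ≤ j ∧ ts[i]?.any p = true ∧ ts[j]?.any q = true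

theorem any_iff_exists_idx {α : Type} (q : α → Bool) (ts : List α) :
    ts.any q = true ↔ ∃ j : Nat, ts[j]?.any q = true := by
  simp only [List.any_eq_true]
  constructor
  · rintro ⟨x, hx, hq⟩
    obtain ⟨j, hj⟩ := List.mem_iff_getElem?.1 hx
    exact ⟨j, by simp [hj, hq]⟩
  · rintro ⟨j, hj⟩
    cases h : ts[j]? with
    | none => simp [h] at hj
    | some x => exact ⟨x, List.mem_of_getElem? h, by simpa [h] using hj⟩

theorem dropWhile_any_iff {α : Type} (p q : α → Bool) (ts : List α) :
    (ts.dropWhile (fun t => !p t)).any q = true ↔ hmsSeq p q ts := by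
  induction ts with
  | nil => simp [hmsSeq]
  | cons a l ih =>
    by_cases hp : p a = true
    · rw [List.dropWhile_cons_of_neg (by simp [hp])]
      rw [any_iff_exists_idx]
      constructor
      · rintro ⟨j, hj⟩
        exact ⟨0, j, Nat.zero_le j, by simp [hp], hj⟩
      · rintro ⟨i, j, _, _, hj⟩
        exact ⟨j, hj⟩
    · rw [List.dropWhile_cons_of_pos (by simp [hp]), ih]
      constructor
      · rintro ⟨i, j, hij, hi, hj⟩
        exact ⟨i + 1, j + 1, by omega, by simpa using hi, by simpa using hj⟩
      · rintro ⟨i, j, hij, hi, hj⟩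
        match i, j with
        | 0, _ => simp [hp] at hi
        | i + 1, 0 => omega
        | i + 1, j + 1 =>
          exact ⟨i, j, by omega, by simpa using hi, by simpa using hj⟩

-- membership in the index list built from enumerate + filter + map
theorem mem_idx_list {α : Type} (r : α → Bool) (ts : List α) (x : Int) :
    x ∈ ((PySem.List.enumerate ts 0).filter (fun pr => r pr.2)).map Prod.fst ↔
      ∃ k : Nat, x = (k : Int) ∧ ts[k]?.any r = true := by
  simp only [List.mem_map, List.mem_filter]
  constructor
  · rintro ⟨⟨n, t⟩, ⟨hmem, hr⟩, rfl⟩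
    obtain ⟨k, hk, hpair⟩ := (PySem.List.mem_enumerate_iff _ _ _).1 hmem
    refine ⟨k, ?_, ?_⟩
    · simpa using congrArg Prod.fst hpair
    · have ht : t = ts[k] := by simpa using congrArg Prod.snd hpair
      simp [List.getElem?_eq_getElem hk, ← ht, hr]
  · rintro ⟨k, rfl, hk⟩
    cases h : ts[k]? with
    | none => simp [h] at hk
    | some t =>
      obtain ⟨hlt, hEq⟩ := List.getElem?_eq_some_iff.1 h
      refine ⟨((k : Int), ts[k]), ⟨?_, ?_⟩, by simp⟩
      · exact (PySem.List.mem_enumerate_iff _ _ _).2 ⟨k, hlt, by simp⟩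
      · show r ts[k] = true
        rw [hEq]
        simpa [h] using hk
  
theorem alt_core_iff {α : Type} (p q : α → Bool) (ts : List α) :
    (match PySem.List.min? (((PySem.List.enumerate ts 0).filter (fun pr => p pr.2)).map Prod.fst) (fun x => x),
           PySem.List.max? (((PySem.List.enumerate ts 0).filter (fun pr => q pr.2)).map Prod.fst) (fun x => x) with
     | some mn, some mx => decide (mn ≤ mx)
     | _, _ => false) = true ↔ hmsSeq p q ts := by
  cases hmn : PySem.List.min? (((PySem.List.enumerate ts 0).filter (fun pr => p pr.2)).map Prod.fst) (fun x => x) with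
  | none =>
    have hempty := (PySem.List.min?_eq_none_iff _ _).1 hmn
    constructor
    · intro h; simp at h
    · rintro ⟨i, j, _, hi, _⟩
      have : (i : Int) ∈ (([] : List Int)) := by
        rw [← hempty]; exact (mem_idx_list p ts _).2 ⟨i, rfl, hi⟩
      simp at this
  | some mn =>
    cases hmx : PySem.List.max? (((PySem.List.enumerate ts 0).filter (fun pr => q pr.2)).map Prod.fst) (fun x => x) with
    | none =>
      have hempty := (PySem.List.max?_eq_none_iff _ _).1 hmx
      constructor
      · intro h; simp at h
      · rintro ⟨i, j, _, _, hj⟩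
        have : (j : Int) ∈ (([] : List Int)) := by
          rw [← hempty]; exact (mem_idx_list q ts _).2 ⟨j, rfl, hj⟩
        simp at this
    | some mx =>
      simp only [decide_eq_true_eq]
      constructor
      · intro hle
        obtain ⟨i, hi_eq, hi⟩ := (mem_idx_list p ts _).1 (PySem.List.min?_mem hmn)
        obtain ⟨j, hj_eq, hj⟩ := (mem_idx_list q ts _).1 (PySem.List.max?_mem hmx)
        have hij : i ≤ j := by
          have h1 : (i : Int) ≤ (j : Int) := by rw [← hi_eq, ← hj_eq]; exact hle
          exact_mod_cast h1
        exact ⟨i, j, hij, hi, hj⟩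
      · rintro ⟨i, j, hij, hi, hj⟩
        have h1 : mn ≤ (i : Int) := by
          have := PySem.List.min?_isMin hmn ((i : Int)) ((mem_idx_list p ts _).2 ⟨i, rfl, hi⟩)
          simpa using this
        have h2 : (j : Int) ≤ mx := by
          have := PySem.List.max?_isMax hmx ((j : Int)) ((mem_idx_list q ts _).2 ⟨j, rfl, hj⟩)
          simpa using this
        have : (i : Int) ≤ (j : Int) := by exact_mod_cast hij
        omega

theorem optAny_map {β γ : Type} (f : β → γ) (r : γ → Bool) (o : Option β) :
    (o.map f).any r = o.any (fun x => r (f x)) := by cases o <;> rfl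

-- hmsSeq over the mapped type list equals hmsSeq over the items with composed predicates
theorem hmsSeq_map (events : List (List (String × String))) :
    hmsSeq hmsScanT hmsBruteT (events.map hmsEventType) ↔ hmsSeq hmsScanI hmsBruteI events := by
  unfold hmsSeq
  constructor <;> rintro ⟨i, j, hij, hi, hj⟩ <;>
    exact ⟨i, j, hij, by simpa [List.getElem?_map, optAny_map, hmsScanI] using hi,
      by simpa [List.getElem?_map, optAny_map, hmsBruteI] using hj⟩

-- ===== VERDICT (by name: the statement is the Claim_ definition above) =====
theorem has_multistage_sequence_spec : Claim_equal_has_multistage_sequence := by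
  intro events _ _
  unfold Spec_has_multistage_sequence has_multistage_sequence has_multistage_sequence_alt
  rw [hmsLoopA_false]
  rw [Bool.eq_iff_iff]
  rw [dropWhile_any_iff, alt_core_iff, hmsSeq_map]
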